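-- pv_equiv track=rewrite | github.com/avasyutkin/term_13 | main.py | mlt3
-- ===== SOURCE A (Python) =====
-- def mlt3(data):
--     levels = [0]
--     current_level = 0
--     direction = 1
--
--     for bit in data:
--         bit = int(bit)
--         if bit == 1:
--             if current_level == 0:
--                 current_level = direction
--             elif current_level == 1:
--                 current_level = 0
--                 direction = -1
--             elif current_level == -1:
--                 current_level = 0
--                 direction = 1
--         levels.append(current_level)
--
--     return levels[1:]
-- ===== SOURCE B (Python) =====
-- def mlt3(data):
--     table = [0, 1, 0, -1]
--     ones = 0
--     out = []
--     for bit in data: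
--         bit = int(bit)
--         if bit == 1:
--             ones += 1
--         out.append(table[ones % 4])
--     return out
-- ===== Notes on version B (the rewrite author's own statement) =====
-- stated objective: simpler
-- what changed: Replaces the current_level/direction state machine with a count of '1' bits seen so far and a lookup in the 4-phase level table [0,1,0,-1] indexed by count mod 4.
import Mathlib
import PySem

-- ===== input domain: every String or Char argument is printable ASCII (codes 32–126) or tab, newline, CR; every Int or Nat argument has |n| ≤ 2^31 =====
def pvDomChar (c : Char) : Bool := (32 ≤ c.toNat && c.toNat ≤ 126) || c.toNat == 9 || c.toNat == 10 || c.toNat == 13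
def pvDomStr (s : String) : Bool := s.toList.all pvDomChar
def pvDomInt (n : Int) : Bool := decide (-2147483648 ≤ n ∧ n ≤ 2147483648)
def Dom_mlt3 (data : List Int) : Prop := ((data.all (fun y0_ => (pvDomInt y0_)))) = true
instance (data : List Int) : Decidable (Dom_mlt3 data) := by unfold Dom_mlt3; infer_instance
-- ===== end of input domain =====

-- ===== PORT A =====
-- B replaces A's current_level/direction state machine by a ones-counter and a phase table (objective: simpler).
def mlt3 (data : List Int) : List Int :=
  -- state: (levels, current_level, direction); levels starts [0], result is levels[1:]
  (data.foldl (fun (st : List Int × Int × Int) bit =>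
      let levels := st.1
      let cl := st.2.1
      let d := st.2.2
      if bit == 1 then
        if cl == 0 then (levels ++ [d], d, d)
        else if cl == 1 then (levels ++ [0], 0, -1)
        else if cl == -1 then (levels ++ [0], 0, 1)
        else (levels ++ [cl], cl, d)
      else (levels ++ [cl], cl, d))
    ([0], 0, 1)).1.drop 1  -- levels[1:] with nonneg literal start = drop 1 (exact)

-- ===== PORT B =====
-- counter of '1' bits is a nonnegative count: Nat is exact; table index ones % 4 is always in range
def mlt3_alt (data : List Int) : List Int :=
  (data.foldl (fun (st : List Int × Nat) bit =>
      let ones := if bit == 1 then st.2 + 1 else st.2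
      (st.1 ++ [([0, 1, 0, -1] : List Int).getD (ones % 4) 0], ones))
    ([], 0)).1

-- ===== PRECONDITION & SPEC =====
def Spec_mlt3 (data : List Int) (out : List Int) : Prop := out = mlt3_alt data
instance (data : List Int) (out : List Int) : Decidable (Spec_mlt3 data out) := by unfold Spec_mlt3; infer_instance

-- ===== CLAIM (what is proved, stated in full; the proofs are below) =====
def Claim_equal_mlt3 : Prop := ∀ (data : List Int), Dom_mlt3 data → Spec_mlt3 data (mlt3 data)

-- ===== LEMMAS AND PROOFS =====

-- level and direction of A's state machine as functions of the ones-count mod 4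
def pvTab (c : Nat) : Int := ([0, 1, 0, -1] : List Int).getD (c % 4) 0
def pvDir (c : Nat) : Int := if c % 4 < 2 then 1 else -1

lemma mlt3_loop_eq : ∀ (data : List Int) (acc : List Int) (c : Nat),
    (data.foldl (fun (st : List Int × Int × Int) bit =>
      let levels := st.1
      let cl := st.2.1
      let d := st.2.2
      if bit == 1 then
        if cl == 0 then (levels ++ [d], d, d)
        else if cl == 1 then (levels ++ [0], 0, -1)
        else if cl == -1 then (levels ++ [0], 0, 1)
        else (levels ++ [cl], cl, d)
      else (levels ++ [cl], cl, d)) (acc, pvTab c, pvDir c)).1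
    = (data.foldl (fun (st : List Int × Nat) bit =>
      let ones := if bit == 1 then st.2 + 1 else st.2
      (st.1 ++ [([0, 1, 0, -1] : List Int).getD (ones % 4) 0], ones)) (acc, c)).1 := by
  intro data
  induction data with
  | nil => intro acc c; rfl
  | cons bit rest ih =>
    intro acc c
    by_cases hb : bit = 1
    · have hstep : ((fun (st : List Int × Int × Int) bit =>
        let levels := st.1
        let cl := st.2.1
        let d := st.2.2
        if bit == 1 then
          if cl == 0 then (levels ++ [d], d, d)
          else if cl == 1 then (levels ++ [0], 0, -1)
          else if cl == -1 then (levels ++ [0], 0, 1)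
          else (levels ++ [cl], cl, d)
        else (levels ++ [cl], cl, d)) (acc, pvTab c, pvDir c) bit)
          = (acc ++ [pvTab (c + 1)], pvTab (c + 1), pvDir (c + 1)) := by
        subst hb
        have h4 : c % 4 = 0 ∨ c % 4 = 1 ∨ c % 4 = 2 ∨ c % 4 = 3 := by omega
        have h4' : (c + 1) % 4 = (c % 4 + 1) % 4 := by omega
        rcases h4 with h | h | h | h <;>
          simp [pvTab, pvDir, h, h4']
      have hstep' : ((fun (st : List Int × Nat) bit =>
        let ones := if bit == 1 then st.2 + 1 else st.2
        (st.1 ++ [([0, 1, 0, -1] : List Int).getD (ones % 4) 0], ones)) (acc, c) bit)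
          = (acc ++ [pvTab (c + 1)], c + 1) := by
        subst hb; simp [pvTab]
      simp only [List.foldl_cons, hstep, hstep']
      exact ih _ (c + 1)
    · have hb' : (bit == 1) = false := by simp [hb]
      -- the "bit ≠ 1" branch appends the current level unchanged on both sides
      simp only [List.foldl_cons, hb', if_false, Bool.false_eq_true]
      exact ih (acc ++ [pvTab c]) c

-- ===== VERDICT (by name: the statement is the Claim_ definition above) =====
theorem mlt3_spec : Claim_equal_mlt3 := by
  intro data _
  show mlt3 data = mlt3_alt data
  unfold mlt3 mlt3_alt
  have h := mlt3_loop_eq data [0] 0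
  have htab : pvTab 0 = 0 := rfl
  have hdir : pvDir 0 = 1 := rfl
  rw [htab, hdir] at h
  rw [h]
  -- the B-side fold's accumulator factors out: (fold (a ++ b, c)).1 = a ++ (fold (b, c)).1
  have hacc : ∀ (l : List Int) (a b : List Int) (c : Nat),
      (l.foldl (fun (st : List Int × Nat) bit =>
        let ones := if bit == 1 then st.2 + 1 else st.2
        (st.1 ++ [([0, 1, 0, -1] : List Int).getD (ones % 4) 0], ones)) (a ++ b, c)).1
      = a ++ (l.foldl (fun (st : List Int × Nat) bit =>
        let ones := if bit == 1 then st.2 + 1 else st.2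
        (st.1 ++ [([0, 1, 0, -1] : List Int).getD (ones % 4) 0], ones)) (b, c)).1 := by
    intro l
    induction l with
    | nil => intro a b c; rfl
    | cons x xs ih =>
      intro a b c
      simp only [List.foldl_cons]
      rw [show (a ++ b) ++ [([0,1,0,-1] : List Int).getD ((if x == 1 then c + 1 else c) % 4) 0]
            = a ++ (b ++ [([0,1,0,-1] : List Int).getD ((if x == 1 then c + 1 else c) % 4) 0]) by
            simp]
      exact ih a _ _
  have h2 := hacc data [0] [] 0
  simp only [List.append_nil] at h2
  rw [h2]
  simp
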